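-- pv_equiv track=rewrite | github.com/Choukette-offi/Liaison_V1 | INIT_PROG/TP8a problème de mots de passe-20241105/motdepasse.py | un_petit_chiffre
-- ===== SOURCE A (Python) =====
-- def un_petit_chiffre(mdp):
--     """permet de savoir si le plus petit chiffre est présent 2 fois
--
--     Args:
--         mdp (str): mot de passe a tester
--
--     Returns:
--         bool: renvoie True si le mdp contient 1 fois le plus petit nombre sinon renvoie False
--     """
--     mini = "9"
--     for chif in mdp:
--         if chif.isdigit() and chif <= mini:
--             mini = chif
--     cpt = 0
--     for car in mdp:
--         if car == mini:
--             cpt += 1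
--             if cpt == 2:
--                 return False
--     return True
-- ===== SOURCE B (Python) =====
-- def un_petit_chiffre(mdp):
--     """Single pass: track the smallest digit seen and how many times it occurs."""
--     mini = "9"
--     cpt = 0
--     for c in mdp:
--         if c.isdigit():
--             if c < mini:
--                 mini = c
--                 cpt = 1
--             elif c == mini:
--                 cpt += 1
--     return cpt < 2
-- ===== Notes on version B (the rewrite author's own statement) =====
-- stated objective: faster
-- what changed: B replaces A's two sequential scans (first find the smallest digit, then count it with an early-exit loop) by one fused pass that maintains the current smallest digit together with its multiplicity, resetting the count to 1 whenever a strictly smaller digit appears; one scan instead of two makes it measurably faster.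
import Mathlib
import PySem

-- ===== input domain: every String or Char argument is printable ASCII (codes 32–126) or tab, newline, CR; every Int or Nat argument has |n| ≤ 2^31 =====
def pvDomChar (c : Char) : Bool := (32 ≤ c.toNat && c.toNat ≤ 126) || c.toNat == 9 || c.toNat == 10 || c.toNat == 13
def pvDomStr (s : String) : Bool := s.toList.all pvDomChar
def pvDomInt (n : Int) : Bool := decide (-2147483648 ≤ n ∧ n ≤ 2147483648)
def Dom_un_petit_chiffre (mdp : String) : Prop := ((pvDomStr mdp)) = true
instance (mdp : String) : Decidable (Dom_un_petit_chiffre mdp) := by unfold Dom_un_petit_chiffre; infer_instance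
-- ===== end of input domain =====

-- B fuses A's two scans (min digit, then count it) into ONE pass that maintains the
-- current smallest digit and its multiplicity — objective: simpler/alternative decomposition.

-- ===== PORT A =====
-- first loop: mini = "9"; for chif in mdp: if chif.isdigit() and chif <= mini: mini = chif
def uncA_mini (l : List Char) : Char :=
  l.foldl (fun m c => if PySem.Chars.isdigit c && decide (c ≤ m) then c else m) '9'

-- second loop with early return: cpt counter, return False as soon as cpt == 2
def uncA_count : List Char → Char → Int → Bool
  | [], _, _ => true
  | c :: t, m, cpt =>
      if c = m then
        if cpt + 1 = 2 then false else uncA_count t m (cpt + 1)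
      else uncA_count t m cpt

def un_petit_chiffre (mdp : String) : Bool :=
  uncA_count mdp.toList (uncA_mini mdp.toList) 0

-- ===== PORT B =====
-- one pass: (mini, cpt); a strictly smaller digit resets cpt to 1, an equal one increments
def uncB_step (s : Char × Nat) (c : Char) : Char × Nat :=
  if PySem.Chars.isdigit c then
    if c < s.1 then (c, 1)
    else if c = s.1 then (s.1, s.2 + 1)
    else s
  else s

def un_petit_chiffre_alt (mdp : String) : Bool :=
  decide ((mdp.toList.foldl uncB_step ('9', 0)).2 < 2)

-- ===== PRECONDITION & SPEC =====
def Spec_un_petit_chiffre (mdp : String) (out : Bool) : Prop := out = un_petit_chiffre_alt mdp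
instance (mdp : String) (out : Bool) : Decidable (Spec_un_petit_chiffre mdp out) := by unfold Spec_un_petit_chiffre; infer_instance

-- ===== CLAIM (what is proved, stated in full; the proofs are below) =====
def Claim_equal_un_petit_chiffre : Prop := ∀ (mdp : String), Dom_un_petit_chiffre mdp → Spec_un_petit_chiffre mdp (un_petit_chiffre mdp)

-- ===== LEMMAS AND PROOFS =====

-- running minimum starting from m, as in A's first loop
def fmin (m : Char) (l : List Char) : Char :=
  l.foldl (fun a c => if PySem.Chars.isdigit c && decide (c ≤ a) then c else a) m

theorem uncA_mini_eq (l : List Char) : uncA_mini l = fmin '9' l := rfl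

theorem fmin_le (l : List Char) : ∀ m, fmin m l ≤ m := by
  induction l with
  | nil => intro m; exact le_refl m
  | cons c t ih =>
      intro m
      show fmin (if PySem.Chars.isdigit c && decide (c ≤ m) then c else m) t ≤ m
      split
      · next h =>
          have hc : c ≤ m := of_decide_eq_true (Bool.and_elim_right h)
          exact le_trans (ih c) hc
      · exact ih m

theorem fmin_digit (l : List Char) :
    ∀ m, PySem.Chars.isdigit m = true → PySem.Chars.isdigit (fmin m l) = true := by
  induction l with
  | nil => intro m hm; exact hm
  | cons c t ih =>
      intro m hm
      show PySem.Chars.isdigit (fmin (if PySem.Chars.isdigit c && decide (c ≤ m) then c else m) t) = true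
      split
      · next h => exact ih c (Bool.and_elim_left h)
      · exact ih m hm

-- invariant of B's single pass
theorem uncB_inv (l : List Char) :
    ∀ (m : Char) (k : Nat), PySem.Chars.isdigit m = true →
      l.foldl uncB_step (m, k) =
        (fmin m l, if fmin m l = m then k + l.count m else l.count (fmin m l)) := by
  induction l with
  | nil => intro m k _; simp [fmin]
  | cons c t ih =>
      intro m k hm
      have hfle : ∀ a, fmin a t ≤ a := fun a => fmin_le t a
      by_cases hd : PySem.Chars.isdigit c = true
      · by_cases hlt : c < m
        · -- strictly smaller digit: reset
          have hfm : fmin m (c :: t) = fmin c t := by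
            simp [fmin, hd, le_of_lt hlt]
          have hne : fmin c t ≠ m := fun h => absurd (h ▸ hfle c) (not_le.mpr hlt)
          have hstep : List.foldl uncB_step ((m, k)) (c :: t)
              = List.foldl uncB_step (c, 1) t := by
            simp [List.foldl, uncB_step, hd, hlt]
          rw [hstep, ih c 1 hd, hfm]
          by_cases hfc : fmin c t = c
          · simp [hfc, hfc ▸ hne]
            omega
          · simp [hfc, hne, Ne.symm hfc]
        · by_cases heq : c = m
          · -- equal to current min: increment
            subst heq
            have hfm : fmin c (c :: t) = fmin c t := by
              simp [fmin, hd]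
            have hstep : List.foldl uncB_step ((c, k)) (c :: t)
                = List.foldl uncB_step (c, k + 1) t := by
              simp [List.foldl, uncB_step, hd]
            rw [hstep, ih c (k + 1) hd, hfm]
            by_cases hfc : fmin c t = c
            · simp [hfc, List.count_cons]
              omega
            · simp [hfc, Ne.symm hfc]
          · -- bigger digit: skip
            have hgt : m < c := lt_of_le_of_ne (not_lt.mp hlt) (Ne.symm heq)
            have hfm : fmin m (c :: t) = fmin m t := by
              simp [fmin, hd, not_le.mpr hgt]
            have hstep : List.foldl uncB_step ((m, k)) (c :: t)
                = List.foldl uncB_step (m, k) t := by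
              simp [List.foldl, uncB_step, hd, hlt, heq]
            rw [hstep, ih m k hm, hfm]
            have hnc : fmin m t ≠ c := fun h => absurd (h ▸ hfle m) (not_le.mpr hgt)
            by_cases hfc : fmin m t = m
            · simp [hfc, heq]
            · simp [hfc, Ne.symm hnc]
      · -- not a digit: skip; c cannot equal any digit min
        have hfm : fmin m (c :: t) = fmin m t := by simp [fmin, hd]
        have hstep : List.foldl uncB_step ((m, k)) (c :: t)
            = List.foldl uncB_step (m, k) t := by
          simp [List.foldl, uncB_step, hd]
        rw [hstep, ih m k hm, hfm]
        have hncm : c ≠ m := fun h => hd (h ▸ hm)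
        have hncf : c ≠ fmin m t := fun h => hd (h ▸ fmin_digit t m hm)
        by_cases hfc : fmin m t = m
        · simp [hfc, hncm]
        · simp [hfc, hncf]

-- A's second loop counts occurrences of m and bails at 2
theorem uncA_count_eq (l : List Char) :
    ∀ (m : Char) (cpt : Int), 0 ≤ cpt → cpt < 2 →
      uncA_count l m cpt = decide (cpt + (l.count m : Int) < 2) := by
  induction l with
  | nil => intro m cpt h0 h2; simp [uncA_count]; omega
  | cons c t ih =>
      intro m cpt h0 h2
      by_cases hc : c = m
      · subst hc
        by_cases h1 : cpt + 1 = 2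
        · simp [uncA_count, h1]
          omega
        · have hc0 : cpt = 0 := by omega
          subst hc0
          have hstep : uncA_count (c :: t) c 0 = uncA_count t c 1 := by
            simp [uncA_count]
          rw [hstep, ih c 1 (by omega) (by omega)]
          simp
      · simp only [uncA_count, if_neg hc]
        rw [ih m cpt h0 h2]
        simp [hc]

theorem un_petit_chiffre_agrees (mdp : String) :
    un_petit_chiffre mdp = un_petit_chiffre_alt mdp := by
  unfold un_petit_chiffre un_petit_chiffre_alt
  rw [uncA_mini_eq, uncA_count_eq _ _ 0 (by omega) (by omega),
      uncB_inv mdp.toList '9' 0 (by decide)]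
  by_cases h : fmin '9' mdp.toList = '9'
  · simp [h]
  · simp [h]

-- ===== VERDICT (by name: the statement is the Claim_ definition above) =====
theorem un_petit_chiffre_spec : Claim_equal_un_petit_chiffre := by
  intro mdp _
  exact un_petit_chiffre_agrees mdp
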